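-- pv_equiv track=rewrite | github.com/ajakusovszky/Advent_of_Code_2024 | codes/day_4.py | get_7x7_matrix
-- ===== SOURCE A (Python) =====
-- def get_7x7_matrix(matrix: str, pos_X: int, pos_Y: int) -> list:
--   """get the 7x7 matrix around the X"""
--   rows = len(matrix)
--   cols = len(matrix[0]) if rows > 0 else 0
--   window = []
--   for i in range(pos_X - 3, pos_X + 4):
--     row = []
--     for j in range(pos_Y - 3, pos_Y + 4):
--       if 0 <= i < rows and 0 <= j < cols:
--         row.append(matrix[i][j])
--       else:
--         row.append(" ")
--     window.append(row)
--   return window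
-- ===== SOURCE B (Python) =====
-- def get_7x7_matrix(matrix, pos_X, pos_Y):
--     """get the 7x7 matrix around the X (slice-based: clamp once, pad with spaces)"""
--     rows = len(matrix)
--     cols = len(matrix[0]) if rows > 0 else 0
--     lo = max(0, pos_Y - 3)
--     hi = min(cols, pos_Y + 4)
--     left = lo - (pos_Y - 3)
--     right = (pos_Y + 4) - hi
--     window = []
--     for i in range(pos_X - 3, pos_X + 4):
--         if 0 <= i < rows and lo < hi:
--             window.append([' '] * left + list(matrix[i][lo:hi]) + [' '] * right)
--         else:
--             window.append([' '] * 7)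
--     return window
-- ===== Notes on version B (the rewrite author's own statement) =====
-- stated objective: alternative
-- what changed: B removes the inner per-cell bounds-checked loop: it clamps the requested column range once and builds each row as left-pad spaces + a slice of the matrix row + right-pad spaces (all-space row when the row index or the whole column window is out of range).
import Mathlib
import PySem

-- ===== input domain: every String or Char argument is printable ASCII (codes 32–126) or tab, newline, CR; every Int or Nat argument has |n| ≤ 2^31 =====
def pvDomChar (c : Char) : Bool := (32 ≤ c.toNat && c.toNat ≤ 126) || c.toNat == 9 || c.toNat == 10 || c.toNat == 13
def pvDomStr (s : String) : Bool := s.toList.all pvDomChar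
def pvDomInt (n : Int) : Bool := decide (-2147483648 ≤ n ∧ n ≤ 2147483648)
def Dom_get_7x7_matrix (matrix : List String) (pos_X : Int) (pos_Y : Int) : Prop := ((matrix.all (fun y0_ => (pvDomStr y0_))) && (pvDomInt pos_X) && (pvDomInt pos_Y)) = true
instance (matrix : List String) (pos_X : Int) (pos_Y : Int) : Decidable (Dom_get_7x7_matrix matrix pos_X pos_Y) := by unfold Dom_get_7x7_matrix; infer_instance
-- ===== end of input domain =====

-- B builds each row by clamped slice arithmetic (pad + slice + pad) instead of A's per-cell
-- bounds-checked inner loop; proved equal wherever A returns (Pre_ excludes A's IndexError inputs).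

-- ===== PORT A =====
def get_7x7_matrix (matrix : List String) (pos_X : Int) (pos_Y : Int) : List (List String) :=
  let rows : Int := matrix.length
  let cols : Int := if rows > 0 then PySem.Str.len (PySem.List.pyGetD matrix 0 "") else 0
  (PySem.List.pyRange (pos_X - 3) (pos_X + 4) 1).map (fun i =>
    (PySem.List.pyRange (pos_Y - 3) (pos_Y + 4) 1).map (fun j =>
      if 0 ≤ i ∧ i < rows ∧ 0 ≤ j ∧ j < cols then
        match PySem.Str.pyGet? (PySem.List.pyGetD matrix i "") j with
        | some c => String.ofList [c]
        | none => " "   -- Python raises IndexError here; excluded by Pre_get_7x7_matrix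
      else " "))

-- ===== PORT B =====
def get_7x7_matrix_alt (matrix : List String) (pos_X : Int) (pos_Y : Int) : List (List String) :=
  let rows : Int := matrix.length
  let cols : Int := if rows > 0 then PySem.Str.len (PySem.List.pyGetD matrix 0 "") else 0
  let lo : Int := max 0 (pos_Y - 3)
  let hi : Int := min cols (pos_Y + 4)
  let left : Int := lo - (pos_Y - 3)
  let right : Int := (pos_Y + 4) - hi
  (PySem.List.pyRange (pos_X - 3) (pos_X + 4) 1).map (fun i =>
    if 0 ≤ i ∧ i < rows ∧ lo < hi then
      List.replicate left.toNat " " ++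
        (PySem.List.slice (PySem.List.pyGetD matrix i "").toList (some lo) (some hi)).map
          (fun c => String.ofList [c]) ++
      List.replicate right.toNat " "
    else List.replicate 7 " ")

-- ===== PRECONDITION & SPEC =====
-- Pre_ is exactly where the Python A returns: A raises IndexError iff some row inside the
-- window is shorter than the covered part [lo, hi) of the column window.
def Pre_get_7x7_matrix (matrix : List String) (pos_X : Int) (pos_Y : Int) : Prop :=
  ∀ k : Nat, k < matrix.length →
    pos_X - 3 ≤ (k : Int) → (k : Int) < pos_X + 4 →
    max 0 (pos_Y - 3) < min (if (matrix.length : Int) > 0 then PySem.Str.len (PySem.List.pyGetD matrix 0 "") else 0) (pos_Y + 4) →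
    min (if (matrix.length : Int) > 0 then PySem.Str.len (PySem.List.pyGetD matrix 0 "") else 0) (pos_Y + 4) ≤ PySem.Str.len (matrix.getD k "")
instance (matrix : List String) (pos_X : Int) (pos_Y : Int) : Decidable (Pre_get_7x7_matrix matrix pos_X pos_Y) := by unfold Pre_get_7x7_matrix; infer_instance

def pvWitness_get_7x7_matrix : List String × Int × Int := (["abc", "def", "ghi"], 1, 1)


def Spec_get_7x7_matrix (matrix : List String) (pos_X : Int) (pos_Y : Int) (out : List (List String)) : Prop := out = get_7x7_matrix_alt matrix pos_X pos_Y
instance (matrix : List String) (pos_X : Int) (pos_Y : Int) (out : List (List String)) : Decidable (Spec_get_7x7_matrix matrix pos_X pos_Y out) := by unfold Spec_get_7x7_matrix; infer_instance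

-- ===== CLAIM (what is proved, stated in full; the proofs are below) =====
def Claim_equal_get_7x7_matrix : Prop := ∀ (matrix : List String) (pos_X : Int) (pos_Y : Int), Dom_get_7x7_matrix matrix pos_X pos_Y → Pre_get_7x7_matrix matrix pos_X pos_Y → Spec_get_7x7_matrix matrix pos_X pos_Y (get_7x7_matrix matrix pos_X pos_Y)

-- ===== LEMMAS AND PROOFS =====

-- a map whose function is constantly " " on the range is a replicate
lemma mapBlank (f : Int → String) (n : Nat) (a : Int)
    (h : ∀ j, a ≤ j → j < a + n → f j = " ") :
    (PySem.List.pyRange a (a + n) 1).map f = List.replicate n " " := by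
  have h1 : (PySem.List.pyRange a (a + n) 1).map f
      = (PySem.List.pyRange a (a + n) 1).map (fun _ => " ") := by
    apply List.map_congr_left
    intro j hj
    rw [PySem.List.mem_pyRange_one] at hj
    exact h j hj.1 hj.2
  rw [h1, List.map_const', PySem.List.length_pyRange_one]
  congr 1
  omega

-- slice peels its first element
lemma slice_cons (t : List Char) (a b : Int) (h0 : 0 ≤ a) (hb : 0 ≤ b)
    (hlen : a < (t.length : Int)) :
    PySem.List.slice t (some a) (some b)
      = if a < b then t[a.toNat]'(by omega) :: PySem.List.slice t (some (a + 1)) (some b)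
        else [] := by
  rw [PySem.List.slice_toNat t h0 hb, PySem.List.slice_toNat t (by omega : (0:Int) ≤ a + 1) hb]
  have hlt : a.toNat < t.length := by omega
  by_cases hab : a < b
  · rw [if_pos hab, List.drop_eq_getElem_cons hlt,
      show b.toNat - a.toNat = (b.toNat - (a + 1).toNat) + 1 by omega, List.take_succ_cons,
      show a.toNat + 1 = (a + 1).toNat by omega]
  · rw [if_neg hab, show b.toNat - a.toNat = 0 by omega, List.take_zero]

-- core row lemma: A's inner per-cell loop equals pad ++ slice ++ pad
lemma rowCore (n : Nat) : ∀ (a cols : Int) (t : List Char),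
    min cols (a + n) ≤ (t.length : Int) →
    max 0 a < min cols (a + n) →
    (PySem.List.pyRange a (a + n) 1).map (fun j =>
        if 0 ≤ j ∧ j < cols then
          match PySem.List.pyGet? t j with
          | some c => String.ofList [c]
          | none => " "
        else " ")
      = List.replicate (max 0 a - a).toNat " " ++
        (PySem.List.slice t (some (max 0 a)) (some (min cols (a + n)))).map (fun c => String.ofList [c]) ++
        List.replicate (a + n - min cols (a + n)).toNat " " := by
  induction n with
  | zero =>
    intro a cols t _ hlt
    exfalso
    push_cast at hlt
    omega

  | succ n ih =>
    intro a cols t hlen hlt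
    have hcast : a + 1 + (n : Int) = a + ((n + 1 : Nat) : Int) := by push_cast; ring
    have hab : a < a + ((n + 1 : Nat) : Int) := by omega
    rw [PySem.List.pyRange_one_cons hab, List.map_cons]
    by_cases ha : a < 0
    · -- head is a left-pad blank
      rw [if_neg (by omega : ¬(0 ≤ a ∧ a < cols))]
      have hIH := ih (a + 1) cols t (by omega) (by omega)
      rw [hcast] at hIH
      rw [hIH, show max 0 (a + 1) = max 0 a by omega,
        show (max 0 a - a).toNat = (max 0 a - (a + 1)).toNat + 1 by omega, List.replicate_succ]
      simp
    · -- head is a real cell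
      have ha0 : (0:Int) ≤ a := by omega
      have hacols : a < cols := by omega
      have halen : a < (t.length : Int) := by omega
      rw [if_pos ⟨ha0, hacols⟩, PySem.List.pyGet?_eq_some_getElem t ha0 halen]
      rw [show max 0 a = a by omega, show (a - a).toNat = 0 by omega, List.replicate_zero,
        List.nil_append]
      rw [slice_cons t a (min cols (a + ((n + 1 : Nat) : Int))) ha0 (by omega) halen,
        if_pos (by omega), List.map_cons]
      by_cases hh : a + 1 < min cols (a + ((n + 1 : Nat) : Int))
      · have hIH := ih (a + 1) cols t (by omega) (by omega)
        rw [hcast] at hIH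
        rw [hIH, show max 0 (a + 1) = a + 1 by omega,
          show (a + 1 - (a + 1)).toNat = 0 by omega, List.replicate_zero, List.nil_append]
        simp
      · -- the window ends right after a : the tail is all blanks
        have hhi : min cols (a + ((n + 1 : Nat) : Int)) = a + 1 := by omega
        have htail : (PySem.List.pyRange (a + 1) (a + ((n + 1 : Nat) : Int)) 1).map (fun j =>
            if 0 ≤ j ∧ j < cols then
              match PySem.List.pyGet? t j with
              | some c => String.ofList [c]
              | none => " "
            else " ") = List.replicate n " " := by
          rw [show a + ((n + 1 : Nat) : Int) = (a + 1) + (n : Int) by push_cast; ring]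
          apply mapBlank
          intro j hj1 hj2
          rw [if_neg (by omega : ¬(0 ≤ j ∧ j < cols))]
        rw [htail]
        rw [PySem.List.slice_toNat t (by omega : (0:Int) ≤ a + 1) (by omega),
          show (min cols (a + ((n + 1 : Nat) : Int))).toNat - (a + 1).toNat = 0 by omega,
          List.take_zero, List.map_nil]
        rw [show (a + ((n + 1 : Nat) : Int) - min cols (a + ((n + 1 : Nat) : Int))).toNat = n by omega]
        simp

-- ===== VERDICT (by name: the statement is the Claim_ definition above) =====
theorem get_7x7_matrix_spec : Claim_equal_get_7x7_matrix := by
  intro matrix pos_X pos_Y _ hpre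
  unfold Spec_get_7x7_matrix get_7x7_matrix get_7x7_matrix_alt
  apply List.map_congr_left
  intro i hi
  rw [PySem.List.mem_pyRange_one] at hi
  set cols : Int := if (matrix.length : Int) > 0 then PySem.Str.len (PySem.List.pyGetD matrix 0 "") else 0 with hcols
  by_cases hir : 0 ≤ i ∧ i < (matrix.length : Int)
  · by_cases hlh : max 0 (pos_Y - 3) < min cols (pos_Y + 4)
    · rw [if_pos ⟨hir.1, hir.2, hlh⟩]
      have hrow : (PySem.List.pyGetD matrix i "") = matrix.getD i.toNat "" := by
        conv_lhs => rw [← Int.toNat_of_nonneg hir.1]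
        exact PySem.List.pyGetD_natCast matrix i.toNat ""

      have hlen : min cols (pos_Y + 4) ≤ ((PySem.List.pyGetD matrix i "").toList.length : Int) := by
        have := hpre i.toNat (by omega) (by omega) (by omega) (by rw [← hcols]; exact hlh)
        rw [← hcols, PySem.Str.len] at this
        rw [hrow]
        exact this
      have hcell : (fun j => if 0 ≤ i ∧ i < (matrix.length : Int) ∧ 0 ≤ j ∧ j < cols then
            match PySem.Str.pyGet? (PySem.List.pyGetD matrix i "") j with
            | some c => String.ofList [c]
            | none => " "
          else " ")
          = (fun j => if 0 ≤ j ∧ j < cols then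
            match PySem.List.pyGet? (PySem.List.pyGetD matrix i "").toList j with
            | some c => String.ofList [c]
            | none => " "
          else " ") := by
        funext j
        by_cases hj : 0 ≤ j ∧ j < cols
        · rw [if_pos ⟨hir.1, hir.2, hj⟩, if_pos hj]
          rfl
        · rw [if_neg (by tauto), if_neg hj]
      rw [hcell]
      rw [show pos_Y + 4 = pos_Y - 3 + ((7 : Nat) : Int) by push_cast; ring] at hlh hlen ⊢
      exact rowCore 7 (pos_Y - 3) cols (PySem.List.pyGetD matrix i "").toList hlen hlh
    · rw [if_neg (fun h => hlh h.2.2),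
        show pos_Y + 4 = pos_Y - 3 + ((7 : Nat) : Int) by push_cast; ring]
      apply mapBlank
      intro j hj1 hj2
      rw [if_neg (by omega : ¬(0 ≤ i ∧ i < (matrix.length : Int) ∧ 0 ≤ j ∧ j < cols))]
  · rw [if_neg (fun h => hir ⟨h.1, h.2.1⟩),
      show pos_Y + 4 = pos_Y - 3 + ((7 : Nat) : Int) by push_cast; ring]
    apply mapBlank
    intro j hj1 hj2
    rw [if_neg (fun h => hir ⟨h.1, h.2.1⟩)]
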